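-- pv_equiv track=rewrite | github.com/yutao-li/leetcode | two sigma/stock game.py | solution
-- ===== SOURCE A (Python) =====
-- def solution(prices: [int], day: int) -> int:
--     n = len(prices)
--     forward = [-1] * n
--     backward = [-1] * n
--     stack = []
--     for i, p in enumerate(prices):
--         while stack and p < prices[stack[-1]]:
--             top = stack.pop()
--             forward[top] = i
--         stack.append(i)
--     stack = []
--     for i, p in enumerate(prices[::-1]):
--         i = n - 1 - i
--         while stack and p < prices[stack[-1]]:
--             top = stack.pop()
--             backward[top] = i
--         stack.append(i)
--     if forward[day] == -1:
--         return backward[day]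
--     if backward[day] == -1:
--         return forward[day]
--     if forward[day] - day > day - backward[day]:
--         return forward[day]
--     else:
--         return backward[day]
-- ===== SOURCE B (Python) =====
-- def solution(prices, day):
--     # Scan outward from the queried day only: no stacks, no full arrays.
--     n = len(prices)
--     p = prices[day]
--     fwd = -1
--     for j in range(day + 1, n):
--         if prices[j] < p:
--             fwd = j
--             break
--     bwd = -1
--     for j in range(day - 1, -1, -1):
--         if prices[j] < p:
--             bwd = j
--             break
--     if fwd == -1:
--         return bwd
--     if bwd == -1:
--         return fwd
--     return fwd if fwd - day > day - bwd else bwd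
-- ===== Notes on version B (the rewrite author's own statement) =====
-- stated objective: faster
-- what changed: Replaces the two monotonic-stack passes that build full next-smaller index arrays for every position with two direct outward scans from the queried day (first index to the right with a strictly smaller price, then the first to the left), keeping the -1 sentinels and A's tie-break toward the left neighbour.
-- outside the precondition, e.g. on solution([5, 1, 9, 3], -2): A returns 3, B returns -1
import Mathlib
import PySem

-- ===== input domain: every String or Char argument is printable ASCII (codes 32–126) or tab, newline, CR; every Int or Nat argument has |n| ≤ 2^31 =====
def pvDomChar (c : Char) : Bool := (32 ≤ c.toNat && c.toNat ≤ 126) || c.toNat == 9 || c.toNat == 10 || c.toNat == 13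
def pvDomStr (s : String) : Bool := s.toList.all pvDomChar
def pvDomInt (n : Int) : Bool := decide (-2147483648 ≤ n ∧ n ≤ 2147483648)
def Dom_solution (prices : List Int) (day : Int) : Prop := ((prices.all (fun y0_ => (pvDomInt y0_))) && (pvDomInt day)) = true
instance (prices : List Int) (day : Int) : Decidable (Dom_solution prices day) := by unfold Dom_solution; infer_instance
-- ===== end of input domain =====

-- B replaces A's two monotonic-stack passes (which build full next-smaller arrays) with two direct
-- outward scans from the queried day; same return value on every in-range day (measured faster).

-- ===== PORT A =====
-- the inner 'while stack and p < prices[stack[-1]]' loop; stack is held top-first.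
-- stack entries are always indices in range, so '(pyGet? …).getD 0' is exactly prices[stack[-1]]
-- and 'top.toNat' is exact for the (nonnegative) stored indices.
def popLoopA (prices : List Int) (p : Int) (i : Int) : List Int → List Int → List Int × List Int
  | [], out => ([], out)
  | top :: rest, out =>
    if p < (PySem.List.pyGet? prices top).getD 0 then
      popLoopA prices p i rest (out.set top.toNat i)
    else (top :: rest, out)

-- one iteration of 'for i, p in enumerate(…)': run the while loop, then stack.append(i)
def stepA (prices : List Int) (st : List Int × List Int) (ip : Int × Int) : List Int × List Int :=
  let r := popLoopA prices ip.2 ip.1 st.1 st.2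
  (ip.1 :: r.1, r.2)
def solution (prices : List Int) (day : Int) : Int :=
  let n : Int := (prices.length : Int)
  let forward :=
    ((PySem.List.enumerate prices 0).foldl (stepA prices)
      ([], List.replicate prices.length (-1))).2
  let backward :=
    ((PySem.List.enumerate ((PySem.List.slice? prices none none (-1)).getD []) 0).foldl
      (fun st ip => stepA prices st (n - 1 - ip.1, ip.2))
      ([], List.replicate prices.length (-1))).2
  -- forward[day] / backward[day]; in range under Pre_, so the getD default is never used
  let f := (PySem.List.pyGet? forward day).getD 0
  let b := (PySem.List.pyGet? backward day).getD 0
  if f = -1 then b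
  else if b = -1 then f
  else if f - day > day - b then f else b

-- ===== PORT B =====
-- 'for j in range(…): if prices[j] < p: fwd = j; break' (result -1 when the loop finishes)
def firstSmaller (prices : List Int) (p : Int) : List Int → Int
  | [] => -1
  | j :: rest =>
    if (PySem.List.pyGet? prices j).getD 0 < p then j else firstSmaller prices p rest

def solution_alt (prices : List Int) (day : Int) : Int :=
  let n : Int := (prices.length : Int)
  let p := (PySem.List.pyGet? prices day).getD 0
  let fwd := firstSmaller prices p (PySem.List.pyRange (day + 1) n 1)
  let bwd := firstSmaller prices p (PySem.List.pyRange (day - 1) (-1) (-1))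
  if fwd = -1 then bwd
  else if bwd = -1 then fwd
  else if fwd - day > day - bwd then fwd else bwd

-- ===== PRECONDITION & SPEC =====
-- Pre_ excludes day outside [-len, len) (A raises IndexError) and negative in-range day, where A's
-- value is an artefact of Python's negative-index wraparound fed into a distance comparison against
-- the negative index itself — a corner no caller of a day index would specify.
def Pre_solution (prices : List Int) (day : Int) : Prop := 0 ≤ day ∧ day < prices.length
instance (prices : List Int) (day : Int) : Decidable (Pre_solution prices day) := by
  unfold Pre_solution; infer_instance
def pvWitness_solution : List Int × Int := ([3, 1, 2], 1)

def Spec_solution (prices : List Int) (day : Int) (out : Int) : Prop := out = solution_alt prices day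
instance (prices : List Int) (day : Int) (out : Int) : Decidable (Spec_solution prices day out) := by
  unfold Spec_solution; infer_instance

-- ===== CLAIM (what is proved, stated in full; the proofs are below) =====
def Claim_equal_solution : Prop := ∀ (prices : List Int) (day : Int), Dom_solution prices day → Pre_solution prices day → Spec_solution prices day (solution prices day)

-- ===== LEMMAS AND PROOFS =====

-- prices[k] as both ports read it (used only at in-range indices in the proofs)
def pv (prices : List Int) (k : Int) : Int := (PySem.List.pyGet? prices k).getD 0
theorem pv_eq (prices : List Int) (k : Int) :
    (PySem.List.pyGet? prices k).getD 0 = pv prices k := rfl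

theorem popLoopA_fst (prices : List Int) (p i : Int) (st out : List Int) :
    (popLoopA prices p i st out).1 = st.dropWhile (fun k => decide (p < pv prices k)) := by
  induction st generalizing out with
  | nil => simp [popLoopA]
  | cons top rest ih =>
    rw [popLoopA, pv_eq]
    by_cases h : p < pv prices top
    · rw [if_pos h, List.dropWhile_cons]
      simp only [h, decide_true, if_true]
      exact ih _
    · rw [if_neg h, List.dropWhile_cons]
      simp [h]

theorem popLoopA_len (prices : List Int) (p i : Int) (st out : List Int) :
    (popLoopA prices p i st out).2.length = out.length := by
  induction st generalizing out with
  | nil => simp [popLoopA]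
  | cons top rest ih =>
    rw [popLoopA, pv_eq]
    by_cases h : p < pv prices top
    · rw [if_pos h]; rw [ih]; simp
    · rw [if_neg h]

theorem popLoopA_untouched (prices : List Int) (p i : Int) (st out : List Int) (m : Nat)
    (h : ∀ k ∈ st, p < pv prices k → k.toNat ≠ m) :
    (popLoopA prices p i st out).2[m]? = out[m]? := by
  induction st generalizing out with
  | nil => simp [popLoopA]
  | cons top rest ih =>
    rw [popLoopA, pv_eq]
    by_cases hp : p < pv prices top
    · rw [if_pos hp]
      rw [ih _ (fun k hk => h k (List.mem_cons_of_mem _ hk))]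
      exact List.getElem?_set_ne (fun he => h top (List.mem_cons_self) hp (by omega))
    · rw [if_neg hp]

theorem popLoopA_hit (prices : List Int) (p i : Int) (d : Int) (s1 s2 : List Int)
    (hd : p < pv prices d) (hs2 : ∀ k ∈ s2, k.toNat ≠ d.toNat) :
    ∀ out : List Int, (∀ k ∈ s1, p < pv prices k) → d.toNat < out.length →
    (popLoopA prices p i (s1 ++ d :: s2) out).2[d.toNat]? = some i ∧
    (popLoopA prices p i (s1 ++ d :: s2) out).1
      = s2.dropWhile (fun k => decide (p < pv prices k)) := by
  induction s1 with
  | nil =>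
    intro out _ hlen
    simp only [List.nil_append]
    rw [popLoopA, pv_eq, if_pos hd]
    constructor
    · rw [popLoopA_untouched prices p i s2 _ d.toNat (fun k hk _ => hs2 k hk)]
      exact List.getElem?_set_self hlen
    · rw [popLoopA_fst]
  | cons top rest ih =>
    intro out hs1 hlen
    simp only [List.cons_append]
    rw [popLoopA, pv_eq, if_pos (hs1 top List.mem_cons_self)]
    exact ih _ (fun k hk => hs1 k (List.mem_cons_of_mem _ hk)) (by simpa using hlen)

theorem mem_dropWhile_of_neg {α : Type} (c : α → Bool) {a : α} {l : List α}
    (h : a ∈ l) (hc : c a = false) : a ∈ l.dropWhile c := by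
  induction l with
  | nil => simp at h
  | cons x xs ih =>
    rw [List.dropWhile_cons]
    rcases List.mem_cons.mp h with rfl | hm
    · simp [hc]
    · by_cases hx : c x = true
      · simp [hx]; exact ih hm
      · simp [hx] at *; simp [hm]

theorem pairwise_push (prices : List Int) (p i : Int) (hpi : pv prices i = p) (st : List Int)
    (h : st.Pairwise (fun a b => pv prices b ≤ pv prices a)) :
    (i :: st.dropWhile (fun k => decide (p < pv prices k))).Pairwise
      (fun a b => pv prices b ≤ pv prices a) := by
  induction st with
  | nil => simp
  | cons x xs ih =>
    rw [List.dropWhile_cons]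
    rcases List.pairwise_cons.mp h with ⟨hx, hxs⟩
    by_cases hc : p < pv prices x
    · simp only [hc, decide_true, if_true]
      exact ih hxs
    · simp only [hc, decide_false]
      rw [List.pairwise_cons]
      refine ⟨fun b hb => ?_, h⟩
      rcases List.mem_cons.mp hb with rfl | hm
      · rw [hpi]; omega
      · rw [hpi]; have := hx b hm; omega

theorem fold_untouched (prices : List Int) (m : Nat) :
    ∀ (L : List (Int × Int)) (st out : List Int),
    (∀ q ∈ L, q.1.toNat ≠ m) → (∀ k ∈ st, k.toNat ≠ m) →
    ((L.foldl (stepA prices) (st, out)).2)[m]? = out[m]? := by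
  intro L
  induction L with
  | nil => intro st out _ _; rfl
  | cons q L' ih =>
    intro st out hL hst
    rw [List.foldl_cons]
    have h1 : stepA prices (st, out) q
        = (q.1 :: st.dropWhile (fun k => decide (q.2 < pv prices k)),
           (popLoopA prices q.2 q.1 st out).2) := by
      simp [stepA, popLoopA_fst]
    rw [h1]
    rw [ih _ _ (fun r hr => hL r (List.mem_cons_of_mem _ hr)) ?stk]
    · exact popLoopA_untouched _ _ _ _ _ _ (fun k hk _ => hst k hk)
    case stk =>
      intro k hk
      rcases List.mem_cons.mp hk with rfl | hk2
      · exact hL q List.mem_cons_self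
      · exact hst k ((List.dropWhile_sublist _).subset hk2)

theorem fold_active (prices : List Int) (d : Int) (hd0 : 0 ≤ d) :
    ∀ (L : List (Int × Int)) (st out : List Int),
    d ∈ st →
    st.Pairwise (fun a b => pv prices b ≤ pv prices a) →
    st.Nodup →
    (∀ k ∈ st, 0 ≤ k) →
    (∀ q ∈ L, q.2 = pv prices q.1 ∧ 0 ≤ q.1 ∧ q.1 ∉ st) →
    (L.map Prod.fst).Nodup →
    d.toNat < out.length →
    out[d.toNat]? = some (-1) →
    ((L.foldl (stepA prices) (st, out)).2)[d.toNat]?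
      = some (firstSmaller prices (pv prices d) (L.map Prod.fst)) := by
  intro L
  induction L with
  | nil =>
    intro st out _ _ _ _ _ _ _ hout
    simpa [firstSmaller] using hout
  | cons q L' ih =>
    intro st out hdst hpw hnd hpos hL hLnd hlen hout
    obtain ⟨hq2, hq1pos, hq1st⟩ := hL q List.mem_cons_self
    rw [List.map_cons]
    by_cases hlt : pv prices q.1 < pv prices d
    · -- q pops d: result is q.1
      obtain ⟨s1, s2, rfl⟩ := List.append_of_mem hdst
      have hge : ∀ k ∈ s1, pv prices d ≤ pv prices k := by
        intro k hk
        exact (List.pairwise_append.mp hpw).2.2 k hk d List.mem_cons_self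
      have hs1 : ∀ k ∈ s1, q.2 < pv prices k := by
        intro k hk; rw [hq2]; exact lt_of_lt_of_le hlt (hge k hk)
      have hdq : q.2 < pv prices d := by rw [hq2]; exact hlt
      have hdns2 : d ∉ s2 := by
        have := (List.nodup_append.mp hnd).2.1
        exact (List.nodup_cons.mp this).1
      have hs2 : ∀ k ∈ s2, k.toNat ≠ d.toNat := by
        intro k hk
        have hkpos : 0 ≤ k := hpos k (by simp [hk])
        have hkd : k ≠ d := fun h => hdns2 (h ▸ hk)
        omega
      have hhit := popLoopA_hit prices q.2 q.1 d s1 s2 hdq hs2 out hs1 hlen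
      rw [List.foldl_cons]
      have h1 : stepA prices (s1 ++ d :: s2, out) q
          = (q.1 :: s2.dropWhile (fun k => decide (q.2 < pv prices k)),
             (popLoopA prices q.2 q.1 (s1 ++ d :: s2) out).2) := by
        simp only [stepA]
        rw [hhit.2]
      rw [h1]
      rw [fold_untouched prices d.toNat L' _ _ ?hl ?hs]
      · rw [hhit.1, firstSmaller, pv_eq, if_pos hlt]
      case hl =>
        intro r hr
        obtain ⟨_, hrpos, hrst⟩ := hL r (List.mem_cons_of_mem _ hr)
        have : r.1 ≠ d := fun h => hrst (h ▸ hdst)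
        omega
      case hs =>
        intro k hk
        rcases List.mem_cons.mp hk with rfl | hk2
        · have : q.1 ≠ d := fun h => hq1st (h ▸ hdst)
          omega
        · exact hs2 k ((List.dropWhile_sublist _).subset hk2)
    · -- q does not pop d: recurse
      rw [List.foldl_cons]
      have h1 : stepA prices (st, out) q
          = (q.1 :: st.dropWhile (fun k => decide (q.2 < pv prices k)),
             (popLoopA prices q.2 q.1 st out).2) := by
        simp [stepA, popLoopA_fst]
      rw [h1]
      have huntouched : (popLoopA prices q.2 q.1 st out).2[d.toNat]? = out[d.toNat]? := by
        apply popLoopA_untouched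
        intro k hk hqk heq
        have hkpos : 0 ≤ k := hpos k hk
        have : k = d := by omega
        subst this
        rw [hq2] at hqk
        exact hlt hqk
      have hcd : (fun k => decide (q.2 < pv prices k)) d = false := by
        simp only [decide_eq_false_iff_not]
        rw [hq2]; exact hlt
      rw [ih _ _ ?g1 ?g2 ?g3 ?g4 ?g5 ?g6 ?g7 ?g8]
      · rw [firstSmaller, pv_eq, if_neg hlt]
      case g1 => exact List.mem_cons_of_mem _ (mem_dropWhile_of_neg _ hdst hcd)
      case g2 => exact pairwise_push prices q.2 q.1 hq2.symm st hpw
      case g3 =>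
        rw [List.nodup_cons]
        exact ⟨fun h => hq1st ((List.dropWhile_sublist _).subset h),
               (List.dropWhile_sublist _).nodup hnd⟩
      case g4 =>
        intro k hk
        rcases List.mem_cons.mp hk with rfl | hk2
        · exact hq1pos
        · exact hpos k ((List.dropWhile_sublist _).subset hk2)
      case g5 =>
        intro r hr
        obtain ⟨h1, h2, h3⟩ := hL r (List.mem_cons_of_mem _ hr)
        refine ⟨h1, h2, ?_⟩
        intro hmem
        rcases List.mem_cons.mp hmem with h | h
        · have : q.1 ∉ L'.map Prod.fst := (List.nodup_cons.mp hLnd).1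
          exact this (h ▸ List.mem_map_of_mem hr)
        · exact h3 ((List.dropWhile_sublist _).subset h)
      case g6 => exact (List.nodup_cons.mp hLnd).2
      case g7 => rw [popLoopA_len]; exact hlen
      case g8 => rw [huntouched]; exact hout

theorem fold_main (prices : List Int) (d : Int) (hd0 : 0 ≤ d) :
    ∀ (L1 : List (Int × Int)) (L2 : List (Int × Int)) (pd : Int) (st out : List Int),
    st.Pairwise (fun a b => pv prices b ≤ pv prices a) →
    st.Nodup →
    (∀ k ∈ st, 0 ≤ k) →
    (∀ q ∈ L1 ++ (d, pd) :: L2, q.2 = pv prices q.1 ∧ 0 ≤ q.1 ∧ q.1 ∉ st) →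
    (((L1 ++ (d, pd) :: L2).map Prod.fst)).Nodup →
    d.toNat < out.length →
    out[d.toNat]? = some (-1) →
    (((L1 ++ (d, pd) :: L2).foldl (stepA prices) (st, out)).2)[d.toNat]?
      = some (firstSmaller prices (pv prices d) (L2.map Prod.fst)) := by
  intro L1
  induction L1 with
  | nil =>
    intro L2 pd st out hpw hnd hpos hL hLnd hlen hout
    obtain ⟨hd2, _, hdst⟩ := hL (d, pd) List.mem_cons_self
    simp only [List.nil_append] at *
    rw [List.foldl_cons]
    have h1 : stepA prices (st, out) (d, pd)
        = (d :: st.dropWhile (fun k => decide (pd < pv prices k)),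
           (popLoopA prices pd d st out).2) := by
      simp [stepA, popLoopA_fst]
    rw [h1]
    apply fold_active prices d hd0
    · exact List.mem_cons_self
    · exact pairwise_push prices pd d hd2.symm st hpw
    · rw [List.nodup_cons]
      exact ⟨fun h => hdst ((List.dropWhile_sublist _).subset h),
             (List.dropWhile_sublist _).nodup hnd⟩
    · intro k hk
      rcases List.mem_cons.mp hk with rfl | hk2
      · exact hd0
      · exact hpos k ((List.dropWhile_sublist _).subset hk2)
    · intro r hr
      obtain ⟨h1, h2, h3⟩ := hL r (List.mem_cons_of_mem _ hr)
      refine ⟨h1, h2, ?_⟩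
      intro hmem
      rcases List.mem_cons.mp hmem with h | h
      · have : d ∉ L2.map Prod.fst := by simpa using (List.nodup_cons.mp hLnd).1
        exact this (h ▸ List.mem_map_of_mem hr)
      · exact h3 ((List.dropWhile_sublist _).subset h)
    · exact (List.nodup_cons.mp hLnd).2
    · rw [popLoopA_len]; exact hlen
    · rw [popLoopA_untouched prices pd d st out d.toNat ?un]
      · exact hout
      case un =>
        intro k hk _
        have hkpos : 0 ≤ k := hpos k hk
        have : k ≠ d := fun h => hdst (h ▸ hk)
        omega
  | cons q L1' ih =>
    intro L2 pd st out hpw hnd hpos hL hLnd hlen hout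
    obtain ⟨hq2, hq1pos, hq1st⟩ := hL q (by simp)
    have hdmem : ((d, pd) : Int × Int) ∈ q :: L1' ++ (d, pd) :: L2 := by simp
    have hdst : d ∉ st := (hL (d, pd) hdmem).2.2
    rw [List.cons_append, List.foldl_cons]
    have h1 : stepA prices (st, out) q
        = (q.1 :: st.dropWhile (fun k => decide (q.2 < pv prices k)),
           (popLoopA prices q.2 q.1 st out).2) := by
      simp [stepA, popLoopA_fst]
    rw [h1]
    apply ih L2 pd _ _ ?g2 ?g3 ?g4 ?g5 ?g6 ?g7 ?g8
    case g2 => exact pairwise_push prices q.2 q.1 hq2.symm st hpw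
    case g3 =>
      rw [List.nodup_cons]
      exact ⟨fun h => hq1st ((List.dropWhile_sublist _).subset h),
             (List.dropWhile_sublist _).nodup hnd⟩
    case g4 =>
      intro k hk
      rcases List.mem_cons.mp hk with rfl | hk2
      · exact hq1pos
      · exact hpos k ((List.dropWhile_sublist _).subset hk2)
    case g5 =>
      intro r hr
      obtain ⟨h2, h3, h4⟩ := hL r (List.mem_cons_of_mem _ hr)
      refine ⟨h2, h3, ?_⟩
      intro hmem
      rcases List.mem_cons.mp hmem with h | h
      · have : q.1 ∉ (L1' ++ (d, pd) :: L2).map Prod.fst := by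
          have := hLnd
          rw [List.cons_append, List.map_cons, List.nodup_cons] at this
          exact this.1
        exact this (h ▸ List.mem_map_of_mem hr)
      · exact h4 ((List.dropWhile_sublist _).subset h)
    case g6 =>
      have := hLnd
      rw [List.cons_append, List.map_cons, List.nodup_cons] at this
      exact this.2
    case g7 => rw [popLoopA_len]; exact hlen
    case g8 =>
      rw [popLoopA_untouched prices q.2 q.1 st out d.toNat ?un2]
      · exact hout
      case un2 =>
        intro k hk _
        have hkpos : 0 ≤ k := hpos k hk
        have : k ≠ d := fun h => hdst (h ▸ hk)
        omega

theorem enumerate_reverse_map (xs : List Int) :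
    (PySem.List.enumerate xs.reverse 0).map
        (fun ip => ((xs.length : Int) - 1 - ip.1, ip.2))
      = (PySem.List.enumerate xs 0).reverse := by
  apply List.ext_getElem
  · simp [PySem.List.length_enumerate]
  · intro k h1 h2
    simp only [List.getElem_map, List.getElem_reverse, PySem.List.getElem_enumerate,
      PySem.List.length_enumerate] at *
    have hk : k < xs.length := by simpa using h2
    rw [Prod.mk.injEq]
    exact ⟨by omega, rfl⟩

theorem enumerate_facts (prices : List Int) :
    (∀ q ∈ PySem.List.enumerate prices 0, q.2 = pv prices q.1 ∧ 0 ≤ q.1 ∧ q.1 ∉ ([] : List Int)) ∧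
    ((PySem.List.enumerate prices 0).map Prod.fst).Nodup := by
  constructor
  · intro q hq
    rw [PySem.List.mem_enumerate_iff] at hq
    obtain ⟨k, hk, rfl⟩ := hq
    refine ⟨?_, by simp, by simp⟩
    simp [pv, PySem.List.pyGet?_natCast, List.getElem?_eq_getElem hk]
  · rw [PySem.List.map_fst_enumerate]
    exact PySem.List.nodup_pyRange_one _ _

theorem enumerate_split (prices : List Int) (dm : Nat) (hdm : dm < prices.length) :
    ∃ L1 L2 : List (Int × Int),
      PySem.List.enumerate prices 0 = L1 ++ ((dm : Int), prices[dm]) :: L2 ∧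
      L1.map Prod.fst = PySem.List.pyRange 0 dm 1 ∧
      L2.map Prod.fst = PySem.List.pyRange ((dm : Int) + 1) prices.length 1 := by
  have hsp : prices = prices.take dm ++ prices[dm] :: prices.drop (dm + 1) := by
    conv_lhs => rw [← List.take_append_drop dm prices]
    rw [List.drop_eq_getElem_cons hdm]
  refine ⟨PySem.List.enumerate (prices.take dm) 0,
          PySem.List.enumerate (prices.drop (dm + 1)) ((dm : Int) + 1), ?_, ?_, ?_⟩
  · conv_lhs => rw [hsp]
    rw [PySem.List.enumerate_append, PySem.List.enumerate_cons]
    have hlen : (prices.take dm).length = dm := by simp; omega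
    rw [hlen]
    norm_num
  · rw [PySem.List.map_fst_enumerate]
    have hlen : (prices.take dm).length = dm := by simp; omega
    rw [hlen]
    norm_num
  · rw [PySem.List.map_fst_enumerate]
    have hlen : (prices.drop (dm + 1)).length = prices.length - (dm + 1) := by simp
    rw [hlen]
    congr 1
    omega

theorem forward_at (prices : List Int) (dm : Nat) (hdm : dm < prices.length) :
    ((PySem.List.enumerate prices 0).foldl (stepA prices)
        ([], List.replicate prices.length (-1))).2[dm]?
      = some (firstSmaller prices (pv prices dm)
          (PySem.List.pyRange ((dm : Int) + 1) prices.length 1)) := by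
  obtain ⟨L1, L2, heq, _, hL2⟩ := enumerate_split prices dm hdm
  obtain ⟨hmemfacts, hndfacts⟩ := enumerate_facts prices
  rw [heq] at hmemfacts hndfacts ⊢
  have h := fold_main prices (dm : Int) (by positivity) L1 L2 prices[dm]
    [] (List.replicate prices.length (-1))
    (by simp) (by simp) (by simp)
    (fun q hq => hmemfacts q hq) hndfacts
    (by simpa using hdm)
    (by rw [List.getElem?_replicate]; simp [hdm])
  rw [Int.toNat_natCast] at h
  rw [h, hL2]

theorem backward_at (prices : List Int) (dm : Nat) (hdm : dm < prices.length) :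
    ((PySem.List.enumerate prices.reverse 0).foldl
        (fun st ip => stepA prices st ((prices.length : Int) - 1 - ip.1, ip.2))
        ([], List.replicate prices.length (-1))).2[dm]?
      = some (firstSmaller prices (pv prices dm)
          (PySem.List.pyRange ((dm : Int) - 1) (-1) (-1))) := by
  have hfm := List.foldl_map (f := fun ip : Int × Int => ((prices.length : Int) - 1 - ip.1, ip.2))
    (g := stepA prices) (l := PySem.List.enumerate prices.reverse 0)
    (init := (([], List.replicate prices.length (-1)) : List Int × List Int))
  rw [← hfm, enumerate_reverse_map]
  obtain ⟨L1, L2, heq, hL1, _⟩ := enumerate_split prices dm hdm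
  obtain ⟨hmemfacts, hndfacts⟩ := enumerate_facts prices
  have hrev : (PySem.List.enumerate prices 0).reverse
      = L2.reverse ++ ((dm : Int), prices[dm]) :: L1.reverse := by
    rw [heq]
    simp
  rw [hrev]
  have hmem' : ∀ q ∈ L2.reverse ++ ((dm : Int), prices[dm]) :: L1.reverse,
      q.2 = pv prices q.1 ∧ 0 ≤ q.1 ∧ q.1 ∉ ([] : List Int) := by
    intro q hq
    apply hmemfacts
    rw [heq]
    simp only [List.mem_append, List.mem_cons, List.mem_reverse] at hq ⊢
    tauto
  have hnd' : ((L2.reverse ++ ((dm : Int), prices[dm]) :: L1.reverse).map Prod.fst).Nodup := by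
    rw [← hrev, List.map_reverse, List.nodup_reverse]
    exact hndfacts
  have h := fold_main prices (dm : Int) (by positivity) L2.reverse L1.reverse prices[dm]
    [] (List.replicate prices.length (-1))
    (by simp) (by simp) (by simp)
    (by
      intro q hq
      have := hmem' q hq
      exact ⟨this.1, this.2.1, by simp⟩)
    hnd'
    (by simpa using hdm)
    (by rw [List.getElem?_replicate]; simp [hdm])
  rw [Int.toNat_natCast] at h
  rw [h]
  congr 1
  rw [List.map_reverse, hL1, PySem.List.pyRange_neg_one_eq_reverse]
  have h1 : ((-1 : Int) + 1) = 0 := by norm_num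
  have h2 : ((dm : Int) - 1 + 1) = (dm : Int) := by omega
  rw [h1, h2]

theorem solution_eq_alt (prices : List Int) (day : Int)
    (hpre : 0 ≤ day ∧ day < (prices.length : Int)) :
    solution prices day = solution_alt prices day := by
  obtain ⟨h0, hn⟩ := hpre
  obtain ⟨dm, rfl⟩ : ∃ m : Nat, day = (m : Int) := ⟨day.toNat, by omega⟩
  have hdmlt : dm < prices.length := by omega
  simp only [solution, solution_alt]
  rw [PySem.List.slice?_none_none_neg_one]
  simp only [Option.getD_some, PySem.List.pyGet?_natCast]
  rw [forward_at prices dm hdmlt, backward_at prices dm hdmlt]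
  simp only [Option.getD_some]
  have hpv : pv prices (dm : Int) = prices[dm]?.getD 0 := by simp [pv]
  rw [hpv]

-- ===== VERDICT (by name: the statement is the Claim_ definition above) =====
theorem solution_spec : Claim_equal_solution := by
  intro prices day _ hpre
  unfold Spec_solution
  exact solution_eq_alt prices day hpre
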